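-- pv_equiv track=rewrite | github.com/kazuhiko1979/edabit | 087_very_hard_Is It a Parallelogram.py | is_parallelogram
-- ===== SOURCE A (Python) =====
-- def is_parallelogram(points):
--     if len(points) != 4:
--         return False
--
--     x_coords = [point[0] for point in points]
--     y_coords = [point[1] for point in points]
--
--     sorted_x = sorted(x_coords)
--     sorted_y = sorted(y_coords)
--
--     if sorted_x[0] != sorted_x[1] or sorted_x[2] != sorted_x[3]:
--         return False
--
--     if sorted_y[0] != sorted_y[1] or sorted_y[2] != sorted_y[3]:
--         return False
--
--     return True
-- ===== SOURCE B (Python) =====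
-- def is_parallelogram(points):
--     if len(points) != 4:
--         return False
--     xs = [p[0] for p in points]
--     ys = [p[1] for p in points]
--     return all(xs.count(v) % 2 == 0 for v in xs) and all(ys.count(v) % 2 == 0 for v in ys)
-- ===== Notes on version B (the rewrite author's own statement) =====
-- stated objective: simpler
-- what changed: B drops the sort entirely: instead of sorting each coordinate list and comparing adjacent index pairs, it checks that every value occurs an even number of times in its coordinate list (for 4 points, even multiplicities are exactly the 2+2 / 4 pairings A's sorted-pair test accepts).
import Mathlib
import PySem

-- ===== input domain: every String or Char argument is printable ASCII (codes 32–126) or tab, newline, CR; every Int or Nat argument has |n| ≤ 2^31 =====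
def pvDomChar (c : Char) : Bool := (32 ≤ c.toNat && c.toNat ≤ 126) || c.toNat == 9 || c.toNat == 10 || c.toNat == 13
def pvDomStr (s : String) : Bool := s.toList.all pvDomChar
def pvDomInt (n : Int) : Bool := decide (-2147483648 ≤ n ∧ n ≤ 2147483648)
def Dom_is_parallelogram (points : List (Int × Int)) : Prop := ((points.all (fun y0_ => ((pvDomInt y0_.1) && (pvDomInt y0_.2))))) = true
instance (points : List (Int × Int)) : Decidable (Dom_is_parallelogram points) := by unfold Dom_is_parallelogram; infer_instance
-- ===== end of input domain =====

-- B replaces A's sort-then-compare-adjacent-pairs check by a per-coordinate parity-of-count check (simpler: no sort, no index arithmetic).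


-- ===== PORT A =====
def is_parallelogram (points : List (Int × Int)) : Bool :=
  if points.length ≠ 4 then false
  else
    let x_coords : List Int := points.map (fun point => point.1)
    let y_coords : List Int := points.map (fun point => point.2)
    let sorted_x := PySem.List.sorted x_coords (fun v => v) false
    let sorted_y := PySem.List.sorted y_coords (fun v => v) false
    -- after the guard both sorted lists have length 4, so indices 0..3 never raise; pyGetD is exact here
    if PySem.List.pyGetD sorted_x 0 0 ≠ PySem.List.pyGetD sorted_x 1 0 ∨
       PySem.List.pyGetD sorted_x 2 0 ≠ PySem.List.pyGetD sorted_x 3 0 then false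
    else if PySem.List.pyGetD sorted_y 0 0 ≠ PySem.List.pyGetD sorted_y 1 0 ∨
            PySem.List.pyGetD sorted_y 2 0 ≠ PySem.List.pyGetD sorted_y 3 0 then false
    else true

-- ===== PORT B =====
def is_parallelogram_alt (points : List (Int × Int)) : Bool :=
  if points.length ≠ 4 then false
  else
    let xs : List Int := points.map (fun p => p.1)
    let ys : List Int := points.map (fun p => p.2)
    (xs.all (fun v => PySem.List.count xs v % 2 == 0)) &&
    (ys.all (fun v => PySem.List.count ys v % 2 == 0))

-- ===== PRECONDITION & SPEC =====
def Spec_is_parallelogram (points : List (Int × Int)) (out : Bool) : Prop := out = is_parallelogram_alt points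
instance (points : List (Int × Int)) (out : Bool) : Decidable (Spec_is_parallelogram points out) := by unfold Spec_is_parallelogram; infer_instance

-- ===== CLAIM (what is proved, stated in full; the proofs are below) =====
def Claim_equal_is_parallelogram : Prop := ∀ (points : List (Int × Int)), Dom_is_parallelogram points → Spec_is_parallelogram points (is_parallelogram points)

-- ===== LEMMAS AND PROOFS =====

-- For a sorted quadruple u ≤ v ≤ w ≤ z, A's adjacent-pair test equals B's every-count-even test.
theorem parityQuad (u v w z : Int) (h1 : u ≤ v) (h2 : v ≤ w) (h3 : w ≤ z) :
    (decide (u = v) && decide (w = z)) =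
    ([u, v, w, z].all (fun x => PySem.List.count [u, v, w, z] x % 2 == 0)) := by
  rw [Bool.eq_iff_iff]
  simp only [Bool.and_eq_true, decide_eq_true_eq, List.all_eq_true, List.mem_cons,
    List.not_mem_nil, or_false, beq_iff_eq, PySem.List.count, forall_eq_or_imp, forall_eq]
  constructor
  · rintro ⟨rfl, rfl⟩
    by_cases h : u = w
    · subst h; refine ⟨?_, ?_, ?_, ?_⟩ <;> simp
    · refine ⟨?_, ?_, ?_, ?_⟩ <;> simp [h, Ne.symm h]
  · intro hc
    by_contra hne
    rcases not_and_or.mp hne with h | h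
    · have hlt : u < v := lt_of_le_of_ne h1 h
      have h2' : u < w := lt_of_lt_of_le hlt h2
      have h3' : u < z := lt_of_lt_of_le h2' h3
      have hcount : List.count u [u, v, w, z] = 1 := by
        simp [hlt.ne', h2'.ne', h3'.ne']
      have := hc.1
      omega
    · have hlt : w < z := lt_of_le_of_ne h3 h
      have h2' : v < z := lt_of_le_of_lt h2 hlt
      have h1' : u < z := lt_of_le_of_lt h1 h2'
      have hcount : List.count z [u, v, w, z] = 1 := by
        simp [hlt.ne, h2'.ne, h1'.ne]
      have := hc.2.2.2
      omega

-- A's sorted-pair test on any length-4 list equals B's count-parity test on the same list.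
theorem coordCheck (xs : List Int) (h : xs.length = 4) :
    (decide ¬(PySem.List.pyGetD (PySem.List.sorted xs (fun v => v) false) 0 0 ≠
              PySem.List.pyGetD (PySem.List.sorted xs (fun v => v) false) 1 0 ∨
              PySem.List.pyGetD (PySem.List.sorted xs (fun v => v) false) 2 0 ≠
              PySem.List.pyGetD (PySem.List.sorted xs (fun v => v) false) 3 0)) =
    xs.all (fun v => PySem.List.count xs v % 2 == 0) := by
  have hperm : (PySem.List.sorted xs (fun v => v) false).Perm xs := PySem.List.sorted_perm xs _ _
  have hpw : (PySem.List.sorted xs (fun v => v) false).Pairwise (fun a b => a ≤ b) :=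
    PySem.List.sorted_pairwise xs _
  have hlen : (PySem.List.sorted xs (fun v => v) false).length = 4 := by
    rw [hperm.length_eq, h]
  match hs : PySem.List.sorted xs (fun v => v) false, hlen with
  | [u, v, w, z], _ =>
    rw [hs] at hperm hpw
    simp only [List.pairwise_cons, List.mem_cons, List.not_mem_nil, or_false,
      forall_eq_or_imp, forall_eq] at hpw
    have hfun : (fun v => PySem.List.count xs v % 2 == 0) =
        (fun x => PySem.List.count [u, v, w, z] x % 2 == 0) := by
      funext t
      simp only [PySem.List.count, hperm.count t]
    rw [hfun, ← hperm.all_eq]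
    rw [← parityQuad u v w z hpw.1.1 hpw.2.1.1 hpw.2.2.1]
    simp [PySem.List.pyGetD]

theorem is_parallelogram_spec : Claim_equal_is_parallelogram := by
  unfold Claim_equal_is_parallelogram Spec_is_parallelogram
  intro points _
  by_cases h : points.length = 4
  · have hx := coordCheck (points.map (fun p => p.1)) (by simp [h])
    have hy := coordCheck (points.map (fun p => p.2)) (by simp [h])
    have hne : ¬(points.length ≠ 4) := by simp [h]
    simp only [is_parallelogram, is_parallelogram_alt, if_neg hne]
    rw [← hx, ← hy]
    by_cases hP1 : (PySem.List.pyGetD (PySem.List.sorted (points.map (fun point => point.1)) (fun v => v) false) 0 0 ≠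
          PySem.List.pyGetD (PySem.List.sorted (points.map (fun point => point.1)) (fun v => v) false) 1 0 ∨
        PySem.List.pyGetD (PySem.List.sorted (points.map (fun point => point.1)) (fun v => v) false) 2 0 ≠
          PySem.List.pyGetD (PySem.List.sorted (points.map (fun point => point.1)) (fun v => v) false) 3 0) <;>
      by_cases hP2 : (PySem.List.pyGetD (PySem.List.sorted (points.map (fun point => point.2)) (fun v => v) false) 0 0 ≠
          PySem.List.pyGetD (PySem.List.sorted (points.map (fun point => point.2)) (fun v => v) false) 1 0 ∨
        PySem.List.pyGetD (PySem.List.sorted (points.map (fun point => point.2)) (fun v => v) false) 2 0 ≠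
          PySem.List.pyGetD (PySem.List.sorted (points.map (fun point => point.2)) (fun v => v) false) 3 0) <;>
      simp [hP1, hP2]
  · simp [is_parallelogram, is_parallelogram_alt, h]
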